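-- pv_equiv track=rewrite | github.com/drr-egan/it-inventory-web | validate-js.py | check_unclosed_braces
-- ===== SOURCE A (Python) =====
-- def check_unclosed_braces(content, filename):
--     """Check for unclosed braces, brackets, parentheses"""
--     errors = []
--
--     stack = []
--     pairs = {'(': ')', '[': ']', '{': '}'}
--     closing = {v: k for k, v in pairs.items()}
--
--     for i, char in enumerate(content):
--         line_num = content[:i].count('\n') + 1
--
--         if char in pairs:
--             stack.append((char, line_num))
--         elif char in closing:
--             if not stack:
--                 errors.append(f"Unexpected closing '{char}' at line {line_num}")
--             else:
--                 opener, opener_line = stack.pop()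
--                 if pairs[opener] != char:
--                     errors.append(f"Mismatched braces: '{opener}' at line {opener_line}, '{char}' at line {line_num}")
--
--     # Check for unclosed openers
--     for opener, line_num in stack:
--         errors.append(f"Unclosed '{opener}' at line {line_num}")
--
--     return errors
-- ===== SOURCE B (Python) =====
-- def check_unclosed_braces(content, filename):
--     """Check for unclosed braces, brackets, parentheses"""
--     errors = []
--     stack = []
--     openers = {')': '(', ']': '[', '}': '{'}
--     line_num = 1
--     for char in content:
--         if char == '\n':
--             line_num += 1
--         elif char in '([{':
--             stack.append((char, line_num))
--         elif char in ')]}':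
--             if stack:
--                 opener, opener_line = stack.pop()
--                 if openers[char] != opener:
--                     errors.append(f"Mismatched braces: '{opener}' at line {opener_line}, '{char}' at line {line_num}")
--             else:
--                 errors.append(f"Unexpected closing '{char}' at line {line_num}")
--     errors.extend(f"Unclosed '{opener}' at line {line_num}" for opener, line_num in stack)
--     return errors
-- ===== Notes on version B (the rewrite author's own statement) =====
-- stated objective: faster
-- what changed: B keeps a running line counter incremented once per newline in a single pass (with the reversed closer->opener dict), instead of A's recount of '\n' over the whole prefix content[:i] for every character, which is quadratic.
import Mathlib
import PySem

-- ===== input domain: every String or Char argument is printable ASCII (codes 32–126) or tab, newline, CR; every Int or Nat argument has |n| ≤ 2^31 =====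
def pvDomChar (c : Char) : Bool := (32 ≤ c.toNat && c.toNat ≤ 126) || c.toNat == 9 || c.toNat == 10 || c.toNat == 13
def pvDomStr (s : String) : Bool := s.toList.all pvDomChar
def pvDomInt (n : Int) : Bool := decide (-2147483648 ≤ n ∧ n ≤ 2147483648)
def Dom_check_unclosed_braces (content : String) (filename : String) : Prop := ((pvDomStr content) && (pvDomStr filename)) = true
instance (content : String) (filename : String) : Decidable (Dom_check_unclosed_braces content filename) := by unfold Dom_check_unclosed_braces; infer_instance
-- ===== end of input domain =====

-- B replaces A's per-character recount of '\n' over the whole prefix content[:i] (quadratic) by a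
-- single pass with a running line counter and the reversed closer→opener dict; messages are identical.

-- The three f-string message formats, identical character for character in A and in B.
def pvMsgUnexpected (char : Char) (line_num : Int) : String :=
  "Unexpected closing '" ++ String.singleton char ++ "' at line " ++ PySem.Int.toStr line_num
def pvMsgMismatch (opener : Char) (opener_line : Int) (char : Char) (line_num : Int) : String :=
  "Mismatched braces: '" ++ String.singleton opener ++ "' at line " ++ PySem.Int.toStr opener_line
    ++ ", '" ++ String.singleton char ++ "' at line " ++ PySem.Int.toStr line_num
def pvMsgUnclosed (opener : Char) (line_num : Int) : String :=
  "Unclosed '" ++ String.singleton opener ++ "' at line " ++ PySem.Int.toStr line_num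

-- ===== PORT A =====
-- pairs = {'(': ')', '[': ']', '{': '}'}
def pvPairsA : PySem.Dict Char Char := PySem.Dict.ofList [('(', ')'), ('[', ']'), ('{', '}')]
-- closing = {v: k for k, v in pairs.items()}
def pvClosingA : PySem.Dict Char Char := PySem.Dict.ofList (pvPairsA.items.map (fun kv => (kv.2, kv.1)))

-- the body of A's `for i, char in enumerate(content)` loop; state = (errors, stack)
def pvStepA (cs : List Char) (st : List String × List (Char × Int)) (ic : Int × Char) :
    List String × List (Char × Int) :=
  let errors := st.1
  let stack := st.2
  let char := ic.2
  -- line_num = content[:i].count('\n') + 1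
  let line_num : Int := (PySem.List.count (PySem.List.slice cs none (some ic.1)) '\n' : Int) + 1
  if pvPairsA.contains char then
    (errors, stack ++ [(char, line_num)])                       -- stack.append((char, line_num))
  else if pvClosingA.contains char then
    if stack.isEmpty then
      (errors ++ [pvMsgUnexpected char line_num], stack)
    else
      let q := stack.getLastD (' ', 0)                          -- stack.pop(); guarded non-empty,
      if pvPairsA.getD q.1 ' ' != char then                     -- so getLastD/dropLast is exact
        (errors ++ [pvMsgMismatch q.1 q.2 char line_num], stack.dropLast)
      else
        (errors, stack.dropLast)
  else st

def check_unclosed_braces (content : String) (_filename : String) : List String :=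
  let cs := content.toList
  let res := (PySem.List.enumerate cs 0).foldl (pvStepA cs) ([], [])
  -- for opener, line_num in stack: errors.append(...)
  res.2.foldl (fun errors p => errors ++ [pvMsgUnclosed p.1 p.2]) res.1

-- ===== PORT B =====
-- openers = {')': '(', ']': '[', '}': '{'}
def pvOpenersB : PySem.Dict Char Char := PySem.Dict.ofList [(')', '('), (']', '['), ('}', '{')]

-- the body of B's `for char in content` loop; state = (errors, stack, line_num)
def pvStepB (st : List String × List (Char × Int) × Int) (char : Char) :
    List String × List (Char × Int) × Int :=
  let errors := st.1
  let stack := st.2.1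
  let line_num := st.2.2
  if char = '\n' then
    (errors, stack, line_num + 1)
  else if PySem.Chars.isIn [char] "([{".toList then             -- char in '([{'
    (errors, stack ++ [(char, line_num)], line_num)
  else if PySem.Chars.isIn [char] ")]}".toList then             -- char in ')]}'
    if !stack.isEmpty then
      let q := stack.getLastD (' ', 0)                          -- stack.pop(); guarded non-empty
      if pvOpenersB.getD char ' ' != q.1 then
        (errors ++ [pvMsgMismatch q.1 q.2 char line_num], stack.dropLast, line_num)
      else
        (errors, stack.dropLast, line_num)
    else
      (errors ++ [pvMsgUnexpected char line_num], stack, line_num)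
  else st

def check_unclosed_braces_alt (content : String) (_filename : String) : List String :=
  let res := content.toList.foldl pvStepB ([], [], 1)
  -- errors.extend(... for opener, line_num in stack)
  res.1 ++ res.2.1.map (fun p => pvMsgUnclosed p.1 p.2)

-- ===== PRECONDITION & SPEC =====
def Spec_check_unclosed_braces (content : String) (filename : String) (out : List String) : Prop := out = check_unclosed_braces_alt content filename
instance (content : String) (filename : String) (out : List String) : Decidable (Spec_check_unclosed_braces content filename out) := by unfold Spec_check_unclosed_braces; infer_instance

-- ===== CLAIM (what is proved, stated in full; the proofs are below) =====
def Claim_equal_check_unclosed_braces : Prop := ∀ (content : String) (filename : String), Dom_check_unclosed_braces content filename → Spec_check_unclosed_braces content filename (check_unclosed_braces content filename)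

-- ===== LEMMAS AND PROOFS =====

-- the (char, line_number) stream both loops effectively process
def pvAnnot : List Char → Int → List (Char × Int)
  | [], _ => []
  | c :: cs, ln => (c, ln) :: pvAnnot cs (if c = '\n' then ln + 1 else ln)

-- A's step with the line number precomputed (definitionally pvStepA with line_num := p.2)
def pvStepC (st : List String × List (Char × Int)) (p : Char × Int) :
    List String × List (Char × Int) :=
  let errors := st.1
  let stack := st.2
  let char := p.1
  let line_num := p.2
  if pvPairsA.contains char then
    (errors, stack ++ [(char, line_num)])
  else if pvClosingA.contains char then
    if stack.isEmpty then
      (errors ++ [pvMsgUnexpected char line_num], stack)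
    else
      let q := stack.getLastD (' ', 0)
      if pvPairsA.getD q.1 ' ' != char then
        (errors ++ [pvMsgMismatch q.1 q.2 char line_num], stack.dropLast)
      else
        (errors, stack.dropLast)
  else st

lemma pairsA_mk : pvPairsA = PySem.Dict.mk [('(', ')'), ('[', ']'), ('{', '}')] := by rfl
lemma closingA_mk : pvClosingA = PySem.Dict.mk [(')', '('), (']', '['), ('}', '{')] := by rfl

-- B's membership tests `char in '([{'` / `char in ')]}'` agree with A's dict-key tests
lemma openTest (c : Char) : PySem.Chars.isIn [c] "([{".toList = pvPairsA.contains c := by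
  by_cases h1 : c = '(' ; · subst h1; decide
  by_cases h2 : c = '[' ; · subst h2; decide
  by_cases h3 : c = '{' ; · subst h3; decide
  simp [PySem.Chars.isIn, PySem.Chars.find, PySem.Chars.find.go, pairsA_mk, PySem.Dict.contains_mk,
        h1, h2, h3, Ne.symm h1, Ne.symm h2, Ne.symm h3]

lemma closeTest (c : Char) : PySem.Chars.isIn [c] ")]}".toList = pvClosingA.contains c := by
  by_cases h1 : c = ')' ; · subst h1; decide
  by_cases h2 : c = ']' ; · subst h2; decide
  by_cases h3 : c = '}' ; · subst h3; decide
  simp [PySem.Chars.isIn, PySem.Chars.find, PySem.Chars.find.go, closingA_mk, PySem.Dict.contains_mk,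
        h1, h2, h3, Ne.symm h1, Ne.symm h2, Ne.symm h3]

-- B's `openers[char] != opener` agrees with A's `pairs[opener] != char` (the pairing is a bijection)
lemma cmpTest (c o : Char) (hc : pvClosingA.contains c = true) :
    (pvOpenersB.getD c ' ' != o) = (pvPairsA.getD o ' ' != c) := by
  rw [closingA_mk] at hc
  simp [PySem.Dict.contains_mk] at hc
  by_cases ho1 : o = '(' ; · subst ho1; rcases hc with h|h|h <;> subst h <;> decide
  by_cases ho2 : o = '[' ; · subst ho2; rcases hc with h|h|h <;> subst h <;> decide
  by_cases ho3 : o = '{' ; · subst ho3; rcases hc with h|h|h <;> subst h <;> decide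
  have hA : pvPairsA.getD o ' ' = ' ' := by
    simp [pairsA_mk, PySem.Dict.getD, Ne.symm ho1, Ne.symm ho2, Ne.symm ho3, PySem.Dict.get?]
  rcases hc with h|h|h <;> subst h <;> rw [hA]
  · rw [show pvOpenersB.getD ')' ' ' = '(' from rfl]
    simp [bne_iff_ne, Ne.symm ho1]
  · rw [show pvOpenersB.getD ']' ' ' = '[' from rfl]
    simp [bne_iff_ne, Ne.symm ho2]
  · rw [show pvOpenersB.getD '}' ' ' = '{' from rfl]
    simp [bne_iff_ne, Ne.symm ho3]

-- A's enumerate-with-prefix-count stream is exactly pvAnnot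
lemma pvStream (cs : List Char) : ∀ (pre full : List Char), full = pre ++ cs →
    (PySem.List.enumerate cs (pre.length : Int)).map
      (fun ic => (ic.2, ((PySem.List.count (PySem.List.slice full none (some ic.1)) '\n' : Int) + 1)))
    = pvAnnot cs ((pre.count '\n' : Int) + 1) := by
  induction cs with
  | nil => intro pre full h; simp [PySem.List.enumerate, pvAnnot]
  | cons c cs ih =>
    intro pre full h
    rw [PySem.List.enumerate_cons, List.map_cons, pvAnnot]
    have h1 : PySem.List.slice full none (some ((pre.length : Nat) : Int)) = pre := by
      rw [PySem.List.slice_to_natCast, h, List.take_left]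
    have h3 := ih (pre ++ [c]) full (by simp [h])
    congr 1
    · simp [h1, PySem.List.count]
    · rw [show (pre.length : Int) + 1 = (((pre ++ [c]).length : Nat) : Int) by simp, h3]
      congr 1
      simp [List.count_append]
      by_cases hc : c = '\n' <;> simp [hc]

lemma pvAfold (cs : List Char) (st : List String × List (Char × Int)) :
    (PySem.List.enumerate cs 0).foldl (pvStepA cs) st = (pvAnnot cs 1).foldl pvStepC st := by
  have h := pvStream cs [] cs rfl
  simp only [List.length_nil, List.count_nil, Nat.cast_zero, zero_add] at h
  rw [← h, List.foldl_map]
  rfl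

-- one step of B is one step of A's logic at the current line number, plus the counter update
lemma pvStepAgree (c : Char) (e : List String) (s : List (Char × Int)) (ln : Int) :
    pvStepB (e, s, ln) c
      = ((pvStepC (e, s) (c, ln)).1, (pvStepC (e, s) (c, ln)).2, if c = '\n' then ln + 1 else ln) := by
  by_cases hn : c = '\n'
  · subst hn
    simp [pvStepB, pvStepC, show pvPairsA.contains '\n' = false from rfl,
          show pvClosingA.contains '\n' = false from rfl]
  · unfold pvStepB pvStepC
    simp only [if_neg hn, openTest, closeTest]
    by_cases h1 : pvPairsA.contains c
    · simp [h1]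
    · by_cases h2 : pvClosingA.contains c
      · have hcmp := fun o => cmpTest c o h2
        cases s with
        | nil => simp [h1, h2]
        | cons p ps =>
          simp [h1, h2, hcmp]
          by_cases hq : pvPairsA.getD (((p :: ps).getLast?.getD (' ', 0)).1) ' ' = c <;>
            simp [hq]
      · simp [h1, h2]

lemma pvBfold (cs : List Char) : ∀ (e : List String) (s : List (Char × Int)) (ln : Int),
    cs.foldl pvStepB (e, s, ln)
      = (((pvAnnot cs ln).foldl pvStepC (e, s)).1, ((pvAnnot cs ln).foldl pvStepC (e, s)).2,
         ln + (cs.count '\n' : Int)) := by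
  induction cs with
  | nil => intro e s ln; simp [pvAnnot]
  | cons c cs ih =>
    intro e s ln
    rw [List.foldl_cons, pvStepAgree, pvAnnot, List.foldl_cons, ih]
    by_cases hn : c = '\n' <;> simp [hn] <;> ring

-- ===== VERDICT (by name: the statement is the Claim_ definition above) =====
theorem check_unclosed_braces_spec : Claim_equal_check_unclosed_braces := by
  intro content filename _
  show check_unclosed_braces content filename = check_unclosed_braces_alt content filename
  unfold check_unclosed_braces check_unclosed_braces_alt
  simp only [pvAfold, pvBfold]
  exact PySem.List.foldl_append_singleton_eq_map _ _ _
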